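-- pv_equiv track=rewrite | github.com/LucasMorettoSilva/persistent-ds | src/util/numbers.py | non_zero
-- ===== SOURCE A (Python) =====
-- def non_zero(n):
--     if n == 0:
--         return 0
--     i = 1
--     for c in reversed(str(n)):
--         if c != "0":
--             return i
--         i += 1
-- ===== SOURCE B (Python) =====
-- def non_zero(n):
--     if n == 0:
--         return 0
--     m = abs(n)
--     i = 1
--     while m % 10 == 0:
--         m //= 10
--         i += 1
--     return i
-- ===== Notes on version B (the rewrite author's own statement) =====
-- stated objective: alternative
-- what changed: B counts trailing zero digits of the absolute value by repeated integer division instead of converting n to a string and scanning its reversed characters.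
import Mathlib
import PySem

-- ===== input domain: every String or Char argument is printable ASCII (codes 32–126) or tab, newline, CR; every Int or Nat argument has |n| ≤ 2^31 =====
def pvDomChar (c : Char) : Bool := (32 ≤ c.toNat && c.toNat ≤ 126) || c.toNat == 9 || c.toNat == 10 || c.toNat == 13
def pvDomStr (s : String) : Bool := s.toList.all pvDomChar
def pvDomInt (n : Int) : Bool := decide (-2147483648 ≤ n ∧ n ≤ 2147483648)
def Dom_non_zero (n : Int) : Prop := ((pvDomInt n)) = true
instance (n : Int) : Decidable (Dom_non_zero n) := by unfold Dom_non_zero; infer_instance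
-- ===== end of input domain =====

-- B replaces A's string conversion + reversed-character scan by pure arithmetic on |n| (alternative algorithm, similar cost).

-- ===== PORT A =====
-- the 'for c in reversed(str(n)): if c != "0": return i; i += 1' loop;
-- the [] case (Python's implicit 'return None' after the loop) is unreachable for n ≠ 0,
-- since str(n) always contains a non-'0' character before the loop runs out.
def nonZeroLoopA : List Char → Int → Int
  | [], _ => 0
  | c :: cs, i => if c ≠ '0' then i else nonZeroLoopA cs (i + 1)

def non_zero (n : Int) : Int :=
  if n = 0 then 0
  else nonZeroLoopA (PySem.Int.toChars n).reverse 1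

-- ===== PORT B =====
-- 'while m % 10 == 0: m //= 10; i += 1' ; the 'm ≠ 0' conjunct is only a totality
-- guard (the Python loop never reaches m = 0, since m % 10 == 0 forces m ≥ 10 there).
def nonZeroCount (m : Nat) (i : Int) : Int :=
  if h : m % 10 = 0 ∧ m ≠ 0 then nonZeroCount (m / 10) (i + 1) else i
  termination_by m
  decreasing_by exact Nat.div_lt_self (Nat.pos_of_ne_zero h.2) (by omega)

def non_zero_alt (n : Int) : Int :=
  if n = 0 then 0
  else nonZeroCount n.natAbs 1

-- ===== PRECONDITION & SPEC =====
def Spec_non_zero (n : Int) (out : Int) : Prop := out = non_zero_alt n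
instance (n : Int) (out : Int) : Decidable (Spec_non_zero n out) := by unfold Spec_non_zero; infer_instance

-- ===== CLAIM (what is proved, stated in full; the proofs are below) =====
def Claim_equal_non_zero : Prop := ∀ (n : Int), Dom_non_zero n → Spec_non_zero n (non_zero n)

-- ===== LEMMAS AND PROOFS =====

-- toDigitsCore appends its result in front of the accumulator
theorem toDigitsCore_acc (b : Nat) : ∀ (f n : Nat) (l : List Char),
    Nat.toDigitsCore b f n l = Nat.toDigitsCore b f n [] ++ l := by
  intro f
  induction f with
  | zero => intro n l; simp [Nat.toDigitsCore]
  | succ f ih =>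
    intro n l
    simp only [Nat.toDigitsCore]
    by_cases h : n / b = 0
    · simp [h]
    · simp only [h, if_false]
      rw [ih (n / b) (Nat.digitChar (n % b) :: l), ih (n / b) [Nat.digitChar (n % b)]]
      simp

-- fuel irrelevance for toDigitsCore on base 10 (any fuel above n works)
theorem toDigitsCore_fuel : ∀ (n f f' : Nat), n < f → n < f' →
    Nat.toDigitsCore 10 f n [] = Nat.toDigitsCore 10 f' n [] := by
  intro n
  induction n using Nat.strong_induction_on with
  | _ n ih =>
    intro f f' hf hf'
    obtain ⟨f₁, rfl⟩ : ∃ k, f = k + 1 := ⟨f - 1, by omega⟩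
    obtain ⟨f₂, rfl⟩ : ∃ k, f' = k + 1 := ⟨f' - 1, by omega⟩
    simp only [Nat.toDigitsCore]
    by_cases h : n / 10 = 0
    · simp [h]
    · simp only [h, if_false]
      have hlt : n / 10 < n := Nat.div_lt_self (by omega) (by omega)
      rw [toDigitsCore_acc 10 f₁, toDigitsCore_acc 10 f₂,
        ih (n / 10) hlt f₁ f₂ (by omega) (by omega)]

theorem toDigits_small {m : Nat} (h : m < 10) :
    Nat.toDigits 10 m = [Nat.digitChar m] := by
  simp [Nat.toDigits, Nat.toDigitsCore, Nat.div_eq_of_lt h, Nat.mod_eq_of_lt h]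

theorem toDigits_step {m : Nat} (h : 10 ≤ m) :
    Nat.toDigits 10 m = Nat.toDigits 10 (m / 10) ++ [Nat.digitChar (m % 10)] := by
  have h10 : m / 10 ≠ 0 := by omega
  simp only [Nat.toDigits, Nat.toDigitsCore, h10, if_false]
  rw [toDigitsCore_acc, toDigitsCore_fuel (m / 10) m (m / 10 + 1)
    (Nat.div_lt_self (by omega) (by omega)) (by omega)]
  simp only [Nat.toDigitsCore]

theorem digitChar_eq_zero_iff {d : Nat} (h : d < 10) :
    (Nat.digitChar d = '0') ↔ d = 0 := by
  interval_cases d <;> simp [Nat.digitChar]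

-- A's reversed scan over the digits of m (plus any suffix ys, e.g. the '-' sign,
-- which is never reached) computes B's division count.
theorem loopA_eq_count : ∀ (m : Nat), 0 < m → ∀ (ys : List Char) (i : Int),
    nonZeroLoopA ((Nat.toDigits 10 m).reverse ++ ys) i = nonZeroCount m i := by
  intro m
  induction m using Nat.strong_induction_on with
  | _ m ih =>
    intro hm ys i
    by_cases hs : m < 10
    · rw [toDigits_small hs]
      have hne : Nat.digitChar m ≠ '0' := by
        rw [Ne, digitChar_eq_zero_iff hs]; omega
      rw [nonZeroCount]
      simp [nonZeroLoopA, hne, Nat.mod_eq_of_lt hs, Nat.pos_iff_ne_zero.mp hm]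
    · have hs' : 10 ≤ m := by omega
      rw [toDigits_step hs']
      have hd : m % 10 < 10 := Nat.mod_lt _ (by omega)
      by_cases hz : m % 10 = 0
      · have hq : 0 < m / 10 := by omega
        have hlt : m / 10 < m := Nat.div_lt_self (by omega) (by omega)
        have hc : Nat.digitChar (m % 10) = '0' := by rw [hz]; decide
        have hrw : (Nat.toDigits 10 (m / 10) ++ [Nat.digitChar (m % 10)]).reverse ++ ys
            = Nat.digitChar (m % 10) :: ((Nat.toDigits 10 (m / 10)).reverse ++ ys) := by simp
        rw [nonZeroCount, dif_pos (show m % 10 = 0 ∧ m ≠ 0 from ⟨hz, by omega⟩), hrw, hc]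
        simpa [nonZeroLoopA] using ih (m / 10) hlt hq ys (i + 1)
      · have hne : Nat.digitChar (m % 10) ≠ '0' := by
          rw [Ne, digitChar_eq_zero_iff hd]; exact hz
        rw [nonZeroCount]
        simp [nonZeroLoopA, hne, hz]

-- ===== VERDICT (by name: the statement is the Claim_ definition above) =====
theorem non_zero_spec : Claim_equal_non_zero := by
  intro n _
  unfold Spec_non_zero non_zero non_zero_alt
  by_cases h0 : n = 0
  · simp [h0]
  · simp only [h0, if_false]
    have habs : 0 < n.natAbs := Int.natAbs_pos.mpr h0
    unfold PySem.Int.toChars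
    by_cases hneg : n < 0
    · simp only [hneg, if_true, List.reverse_cons]
      exact loopA_eq_count n.natAbs habs ['-'] 1
    · simp only [hneg, if_false]
      have : n.toNat = n.natAbs := by omega
      rw [this, ← List.append_nil (Nat.toDigits 10 n.natAbs).reverse]
      exact loopA_eq_count n.natAbs habs [] 1
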